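-- pv_equiv track=rewrite | github.com/hiroyuki-s1/dsp_faust_sample | sim/main.py | _match_param_path
-- ===== SOURCE A (Python) =====
-- def _match_param_path(json_path, faust_paths):
--     """Match a JSON config path to an actual Faust param path."""
--     suffix = "/".join(json_path.strip("/").split("/")[1:])
--     suffix_norm = suffix.replace(" ", "_")
--
--     for fp in faust_paths:
--         fp_suffix = "/".join(fp.strip("/").split("/")[1:])
--         fp_norm = fp_suffix.replace(" ", "_")
--         if fp_norm == suffix_norm:
--             return fp
--
--     last = json_path.split("/")[-1].replace(" ", "_")
--     for fp in faust_paths: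
--         fp_last = fp.split("/")[-1].replace(" ", "_")
--         if fp_last == last:
--             return fp
--
--     return None
-- ===== SOURCE B (Python) =====
-- def _match_param_path(json_path, faust_paths):
--     """Match a JSON config path to an actual Faust param path."""
--     target = "/".join(json_path.strip("/").split("/")[1:]).replace(" ", "_")
--     last = json_path.split("/")[-1].replace(" ", "_")
--     fallback = None
--     for fp in faust_paths:
--         if "/".join(fp.strip("/").split("/")[1:]).replace(" ", "_") == target:
--             return fp
--         if fallback is None and fp.split("/")[-1].replace(" ", "_") == last:
--             fallback = fp
--     return fallback
-- ===== Notes on version B (the rewrite author's own statement) =====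
-- stated objective: simpler
-- what changed: Replaces A's two sequential scans over faust_paths (suffix pass, then last-segment pass) by one scan that returns on the first suffix match and records the first last-segment match as a fallback returned only after the loop.
import Mathlib
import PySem

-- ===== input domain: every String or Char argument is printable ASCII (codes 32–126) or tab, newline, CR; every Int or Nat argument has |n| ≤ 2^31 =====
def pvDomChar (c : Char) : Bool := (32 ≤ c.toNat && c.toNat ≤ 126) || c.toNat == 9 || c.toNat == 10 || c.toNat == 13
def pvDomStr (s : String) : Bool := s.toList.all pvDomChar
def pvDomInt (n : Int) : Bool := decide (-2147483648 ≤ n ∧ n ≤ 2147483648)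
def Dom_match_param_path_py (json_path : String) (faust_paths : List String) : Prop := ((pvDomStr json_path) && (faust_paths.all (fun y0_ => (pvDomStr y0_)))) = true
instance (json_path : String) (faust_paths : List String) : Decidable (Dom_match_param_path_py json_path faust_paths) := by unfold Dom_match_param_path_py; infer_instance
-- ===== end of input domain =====

-- ===== PORT A =====
-- B folds A's two sequential scans into a single scan with a recorded fallback (simpler: one pass, same cost).

-- "/".join(s.strip("/").split("/")[1:]).replace(" ", "_")  (normalized suffix)
def pvNorm (s : String) : String :=
  PySem.Str.replace (PySem.Str.join "/" ((PySem.Str.split? (PySem.Str.stripChars s "/") "/" |>.getD []).drop 1)) " " "_"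

-- s.split("/")[-1].replace(" ", "_")  (normalized last raw segment; split("/") is never empty)
def pvLast (s : String) : String :=
  PySem.Str.replace ((PySem.Str.split? s "/" |>.getD []).getLastD "") " " "_"

-- first pass of A: return fp on first normalized-suffix match
def pvLoop1 (target : String) : List String → Option String
  | [] => none
  | fp :: rest => if pvNorm fp == target then some fp else pvLoop1 target rest

-- second pass of A: return fp on first normalized-last-segment match
def pvLoop2 (last : String) : List String → Option String
  | [] => none
  | fp :: rest => if pvLast fp == last then some fp else pvLoop2 last rest

def match_param_path_py (json_path : String) (faust_paths : List String) : Option String :=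
  match pvLoop1 (pvNorm json_path) faust_paths with
  | some fp => some fp
  | none => pvLoop2 (pvLast json_path) faust_paths

-- ===== PORT B =====
-- single loop of Source B: early return on suffix match, first last-segment match kept as fallback
def pvAltLoop (target last : String) : List String → Option String → Option String
  | [], fallback => fallback
  | fp :: rest, fallback =>
    if pvNorm fp == target then some fp
    else pvAltLoop target last rest
      (if fallback.isNone && (pvLast fp == last) then some fp else fallback)

def match_param_path_py_alt (json_path : String) (faust_paths : List String) : Option String :=
  pvAltLoop (pvNorm json_path) (pvLast json_path) faust_paths none

-- ===== PRECONDITION & SPEC =====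
def Spec_match_param_path_py (json_path : String) (faust_paths : List String) (out : Option String) : Prop := out = match_param_path_py_alt json_path faust_paths
instance (json_path : String) (faust_paths : List String) (out : Option String) : Decidable (Spec_match_param_path_py json_path faust_paths out) := by unfold Spec_match_param_path_py; infer_instance

-- ===== CLAIM (what is proved, stated in full; the proofs are below) =====
def Claim_equal_match_param_path_py : Prop := ∀ (json_path : String) (faust_paths : List String), Dom_match_param_path_py json_path faust_paths → Spec_match_param_path_py json_path faust_paths (match_param_path_py json_path faust_paths)

-- ===== LEMMAS AND PROOFS =====
-- the single pass with fallback equals: first suffix match, else the recorded fallback, else first last match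
theorem pvAltLoop_eq (target last : String) (fps : List String) (fb : Option String) :
    pvAltLoop target last fps fb =
      match pvLoop1 target fps with
      | some fp => some fp
      | none => match fb with
        | some f => some f
        | none => pvLoop2 last fps := by
  induction fps generalizing fb with
  | nil => cases fb <;> simp [pvAltLoop, pvLoop1, pvLoop2]
  | cons fp rest ih =>
    simp only [pvAltLoop, pvLoop1, pvLoop2]
    by_cases h1 : (pvNorm fp == target) = true
    · simp [h1]
    · simp only [h1, Bool.false_eq_true, ite_false, ih]
      cases fb with
      | some f => simp
      | none =>
        by_cases h2 : (pvLast fp == last) = true <;> simp [h2]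

-- ===== VERDICT (by name: the statement is the Claim_ definition above) =====
theorem match_param_path_py_spec : Claim_equal_match_param_path_py := by
  intro jp fps _
  unfold Spec_match_param_path_py match_param_path_py match_param_path_py_alt
  rw [pvAltLoop_eq]
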